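-- pv_equiv track=rewrite | github.com/PLSE-Lab/Python-MLAPI-expl | python_sources/tweet-generator.py | prepare_input_output
-- ===== SOURCE A (Python) =====
-- def prepare_input_output(all_text, seq_length, char2idx):
--     x_data = []  # training
--     y_data = []  # labels
--
--     for i in range(0, len(all_text) - seq_length, 1):
--         # Define input and output sequences
--         # Input is the current character plus desired sequence length
--         in_seq = all_text[i:i + seq_length]
--
--         # Out sequence is the initial character plus total sequence length
--         out_seq = all_text[i + seq_length]
--
--         # We now convert list of characters to integers based on
--         # previously and add the values to our lists
--         x_data.append([char2idx[char] for char in in_seq])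
--         y_data.append(char2idx[out_seq])
--
--     return x_data, y_data
-- ===== SOURCE B (Python) =====
-- def prepare_input_output(all_text, seq_length, char2idx):
--     n = len(all_text) - seq_length
--     if n <= 0:
--         return [], []
--     idx = [char2idx[c] for c in all_text]
--     x_data = [idx[i:i + seq_length] for i in range(n)]
--     y_data = idx[seq_length:]
--     return x_data, y_data
-- ===== Notes on version B (the rewrite author's own statement) =====
-- stated objective: faster
-- what changed: Instead of re-looking up char2idx for every character of every window (seq_length lookups per window), B converts the text to an index list once and then builds x_data by slicing that list and y_data as its single tail slice idx[seq_length:].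
import Mathlib
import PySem

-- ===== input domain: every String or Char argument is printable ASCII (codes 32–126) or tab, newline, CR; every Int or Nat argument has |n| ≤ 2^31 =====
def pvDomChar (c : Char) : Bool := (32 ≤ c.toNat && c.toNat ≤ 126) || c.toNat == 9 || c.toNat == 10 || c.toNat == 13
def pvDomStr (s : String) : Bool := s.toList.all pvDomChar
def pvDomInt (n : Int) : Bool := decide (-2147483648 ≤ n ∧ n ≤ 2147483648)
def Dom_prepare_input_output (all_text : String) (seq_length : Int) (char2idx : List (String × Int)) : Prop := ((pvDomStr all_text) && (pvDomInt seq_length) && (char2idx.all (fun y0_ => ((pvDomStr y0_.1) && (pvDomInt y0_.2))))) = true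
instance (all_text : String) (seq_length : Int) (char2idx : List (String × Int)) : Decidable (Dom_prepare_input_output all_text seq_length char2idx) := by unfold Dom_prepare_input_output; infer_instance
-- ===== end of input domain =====

-- B precomputes char2idx[c] once per character of all_text and builds the windows
-- by slicing that integer list (y_data is one tail slice); objective: fewer dict
-- lookups and plainer code. Equality of RETURN values is proved on Pre_.

-- char2idx[c] for a character c (Python raises KeyError on a missing key; those
-- inputs are excluded by Pre_, the default 0 is never reached there)
def pvLookup (char2idx : List (String × Int)) (c : Char) : Int :=
  PySem.Dict.getD (PySem.Dict.mk char2idx) (String.ofList [c]) 0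

-- ===== PORT A =====
def prepare_input_output (all_text : String) (seq_length : Int) (char2idx : List (String × Int)) : List (List Int) × List Int :=
  let cs := all_text.toList
  (PySem.List.pyRange 0 (PySem.Str.len all_text - seq_length) 1).foldl
    (fun acc i =>
      let in_seq := PySem.List.slice cs (some i) (some (i + seq_length))
      let out_seq := PySem.List.pyGetD cs (i + seq_length) ' '
      (acc.1 ++ [in_seq.map (pvLookup char2idx)], acc.2 ++ [pvLookup char2idx out_seq]))
    ([], [])

-- ===== PORT B =====
def prepare_input_output_alt (all_text : String) (seq_length : Int) (char2idx : List (String × Int)) : List (List Int) × List Int :=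
  let n := PySem.Str.len all_text - seq_length
  if n ≤ 0 then ([], [])
  else
    let idx := all_text.toList.map (pvLookup char2idx)
    ((PySem.List.pyRange 0 n 1).map (fun i => PySem.List.slice idx (some i) (some (i + seq_length))),
     PySem.List.slice idx (some seq_length) none)

-- ===== PRECONDITION & SPEC =====
-- Pre_ keeps the natural domain: a non-negative window length (a negative
-- seq_length makes A's negative string indices wrap around, an accident of
-- Python indexing outside the function's purpose), and, whenever the loop is
-- non-empty, every character of all_text present in char2idx (a missing key
-- makes A raise KeyError).
def Pre_prepare_input_output (all_text : String) (seq_length : Int) (char2idx : List (String × Int)) : Prop :=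
  0 ≤ seq_length ∧
  (seq_length < PySem.Str.len all_text →
    (all_text.toList.all fun c =>
      PySem.Dict.contains (PySem.Dict.mk char2idx) (String.ofList [c])) = true)
instance (all_text : String) (seq_length : Int) (char2idx : List (String × Int)) : Decidable (Pre_prepare_input_output all_text seq_length char2idx) := by unfold Pre_prepare_input_output; infer_instance

def pvWitness_prepare_input_output : String × Int × (List (String × Int)) :=
  ("abab", 2, [("a", 0), ("b", 1)])

def Spec_prepare_input_output (all_text : String) (seq_length : Int) (char2idx : List (String × Int)) (out : List (List Int) × List Int) : Prop := out = prepare_input_output_alt all_text seq_length char2idx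
instance (all_text : String) (seq_length : Int) (char2idx : List (String × Int)) (out : List (List Int) × List Int) : Decidable (Spec_prepare_input_output all_text seq_length char2idx out) := by unfold Spec_prepare_input_output; infer_instance

-- ===== CLAIM (what is proved, stated in full; the proofs are below) =====
def Claim_equal_prepare_input_output : Prop := ∀ (all_text : String) (seq_length : Int) (char2idx : List (String × Int)), Dom_prepare_input_output all_text seq_length char2idx → Pre_prepare_input_output all_text seq_length char2idx → Spec_prepare_input_output all_text seq_length char2idx (prepare_input_output all_text seq_length char2idx)

-- ===== LEMMAS AND PROOFS =====

-- slicing commutes with map (slice's clamping only reads the length)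
theorem pv_slice_map {α β : Type} (xs : List α) (g : α → β) (a? b? : Option Int) :
    PySem.List.slice (xs.map g) a? b? = (PySem.List.slice xs a? b?).map g := by
  simp only [PySem.List.slice, List.length_map, List.map_take, List.map_drop]

theorem prepare_input_output_spec : Claim_equal_prepare_input_output := by
  intro all_text seq_length char2idx _ hpre
  obtain ⟨hL, -⟩ := hpre
  unfold Spec_prepare_input_output prepare_input_output prepare_input_output_alt
  simp only []
  set cs := all_text.toList with hcs
  set N := PySem.Str.len all_text - seq_length with hN
  rw [PySem.List.foldl_prod_mk
        (f := fun acc i => acc ++ [(PySem.List.slice cs (some i) (some (i + seq_length))).map (pvLookup char2idx)])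
        (g := fun acc i => acc ++ [pvLookup char2idx (PySem.List.pyGetD cs (i + seq_length) ' ')]),
      PySem.List.foldl_append_singleton_eq_map, PySem.List.foldl_append_singleton_eq_map]
  by_cases h : N ≤ 0
  · rw [if_pos h, PySem.List.pyRange_one_eq_nil (by omega)]
    simp
  · rw [if_neg h]
    refine Prod.ext ?_ ?_
    · simp only [List.nil_append]
      exact (List.map_congr_left fun i _ => (pv_slice_map cs (pvLookup char2idx) _ _).symm)
    · simp only [List.nil_append]
      rw [pv_slice_map cs (pvLookup char2idx) (some seq_length) none,
          PySem.List.slice_from _ hL]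
      have hlen : PySem.Str.len all_text = PySem.List.len cs := by
        simp [PySem.Str.len_eq, PySem.List.len, hcs]
      have hshift : (PySem.List.pyRange 0 N 1).map (fun i => PySem.List.pyGetD cs (i + seq_length) ' ')
          = (PySem.List.pyRange seq_length (PySem.List.len cs) 1).map (fun j => PySem.List.pyGetD cs j ' ') := by
        rw [PySem.List.pyRange_one 0 N, PySem.List.pyRange_one seq_length]
        simp only [List.map_map]
        have : (PySem.List.len cs - seq_length).toNat = (N - 0).toNat := by
          rw [hN, hlen]; omega
        rw [this]
        refine List.map_congr_left fun k _ => ?_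
        simp [Function.comp]
        ring_nf
      calc (PySem.List.pyRange 0 N 1).map
              ((fun i => pvLookup char2idx (PySem.List.pyGetD cs (i + seq_length) ' ')))
          = ((PySem.List.pyRange 0 N 1).map (fun i => PySem.List.pyGetD cs (i + seq_length) ' ')).map
              (pvLookup char2idx) := by simp [List.map_map, Function.comp]
        _ = ((PySem.List.pyRange seq_length (PySem.List.len cs) 1).map (fun j => PySem.List.pyGetD cs j ' ')).map
              (pvLookup char2idx) := by rw [hshift]
        _ = (cs.drop seq_length.toNat).map (pvLookup char2idx) := by
              rw [PySem.List.map_pyGetD_pyRange cs ' ' hL]
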